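-- pv_equiv track=rewrite | github.com/swarnabhK/dsa_helsinki | 3_EffecientAlgorithms/lastnumber.py | find
-- ===== SOURCE A (Python) =====
-- import heapq
--
-- def find(nums):
--     # Initialize a min-heap with the given list
--     heap = nums[:]
--     heapq.heapify(heap)  # Convert the list into a min-heap
--
--     # Perform the process until only one element remains in the heap
--     while len(heap) > 1:
--         # Extract the two smallest elements from the heap
--         smallest1 = heapq.heappop(heap)
--         smallest2 = heapq.heappop(heap)
--
--         # Calculate the sum minus one
--         result = smallest1 + smallest2 - 1
--
--         # Add the result back to the heap
--         heapq.heappush(heap, result)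
--
--     # Return the last remaining element in the heap
--     return heap[0]
-- ===== SOURCE B (Python) =====
-- def find(nums):
--     # Each merge of two elements replaces them by (sum - 1): after len-1 merges
--     # the single remaining value is sum(nums) - (len(nums) - 1), regardless of order.
--     return sum(nums) - (len(nums) - 1)
-- ===== Notes on version B (the rewrite author's own statement) =====
-- stated objective: faster
-- what changed: Replaces the heap-based merge loop with the closed form sum(nums) - (len(nums) - 1), since every merge step decreases the total sum by exactly 1.
import Mathlib
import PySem

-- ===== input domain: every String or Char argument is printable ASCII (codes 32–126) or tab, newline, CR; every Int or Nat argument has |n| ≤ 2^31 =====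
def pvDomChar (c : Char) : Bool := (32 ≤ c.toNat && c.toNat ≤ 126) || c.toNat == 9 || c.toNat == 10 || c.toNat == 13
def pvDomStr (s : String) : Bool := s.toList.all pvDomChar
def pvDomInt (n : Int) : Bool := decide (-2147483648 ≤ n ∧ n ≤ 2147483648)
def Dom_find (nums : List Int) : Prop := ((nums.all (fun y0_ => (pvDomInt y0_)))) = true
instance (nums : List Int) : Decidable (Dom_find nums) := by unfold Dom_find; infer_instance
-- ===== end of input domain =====

-- B replaces A's heap-merge loop with the closed form sum(nums) - (len(nums) - 1) (faster).
-- ===== PORT A =====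
-- heapq.heappop: remove and return the minimum of the heap (first minimal occurrence).
def pvHeappop (heap : List Int) : Int × List Int :=
  match heap.min? with
  | some m => (m, heap.erase m)
  | none => (0, [])

-- the 'while len(heap) > 1' loop of A; heapify only reorders, the multiset is nums
def findLoop (heap : List Int) : Int :=
  if h : heap.length > 1 then
    let p1 := pvHeappop heap
    let p2 := pvHeappop p1.2
    findLoop ((p1.1 + p2.1 - 1) :: p2.2)
  else heap.headD 0   -- heap[0]; empty heap raises, excluded by Pre_
termination_by heap.length
decreasing_by
  have hm : heap.min?.isSome := by
    cases heap with
    | nil => simp at h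
    | cons a t => simp [List.min?]
  obtain ⟨m, hm⟩ := Option.isSome_iff_exists.mp hm
  have hmem := List.min?_mem hm
  have h1 : (heap.erase m).length = heap.length - 1 := List.length_erase_of_mem hmem
  simp only [pvHeappop, hm]
  cases he : (heap.erase m).min? with
  | none =>
    have : heap.erase m = [] := by
      cases hk : heap.erase m with
      | nil => rfl
      | cons a t => rw [hk] at he; simp [List.min?] at he
    simp [this]
    omega
  | some m2 =>
    have hmem2 := List.min?_mem he
    have h2 : ((heap.erase m).erase m2).length = (heap.erase m).length - 1 :=
      List.length_erase_of_mem hmem2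
    simp only [List.length_cons, h2, h1]
    omega

def find (nums : List Int) : Int := findLoop nums

-- ===== PORT B =====
def find_alt (nums : List Int) : Int := nums.sum - ((nums.length : Int) - 1)

-- ===== PRECONDITION & SPEC =====
-- A raises IndexError on the empty list (pops / heap[0] on an empty heap); excluded here.
def Pre_find (nums : List Int) : Prop := nums ≠ []
instance (nums : List Int) : Decidable (Pre_find nums) := by unfold Pre_find; infer_instance
def pvWitness_find : List Int := [3, 1, 2]

def Spec_find (nums : List Int) (out : Int) : Prop := out = find_alt nums
instance (nums : List Int) (out : Int) : Decidable (Spec_find nums out) := by unfold Spec_find; infer_instance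

-- ===== CLAIM (what is proved, stated in full; the proofs are below) =====
def Claim_equal_find : Prop := ∀ (nums : List Int), Dom_find nums → Pre_find nums → Spec_find nums (find nums)

-- ===== LEMMAS AND PROOFS =====
-- loop invariant: on a nonempty heap the loop returns sum - (length - 1)
theorem findLoop_closed (heap : List Int) (hne : heap ≠ []) :
    findLoop heap = heap.sum - ((heap.length : Int) - 1) := by
  by_cases h : heap.length > 1
  · obtain ⟨m, hm⟩ : ∃ m, heap.min? = some m := by
      cases heap with
      | nil => simp at hne
      | cons a t =>
        cases hk : (a :: t).min? with
        | none => simp [List.min?] at hk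
        | some m => exact ⟨m, rfl⟩
    have hmem := List.min?_mem hm
    have h1 : (heap.erase m).length = heap.length - 1 := List.length_erase_of_mem hmem
    have hs1 : m + (heap.erase m).sum = heap.sum := List.sum_erase hmem
    have hne1 : heap.erase m ≠ [] := by
      intro hk; rw [hk] at h1; simp at h1; omega
    obtain ⟨m2, hm2⟩ : ∃ m2, (heap.erase m).min? = some m2 := by
      cases hk2 : (heap.erase m).min? with
      | none =>
        cases hk : heap.erase m with
        | nil => exact absurd hk hne1
        | cons a t => rw [hk] at hk2; simp [List.min?] at hk2
      | some m2 => exact ⟨m2, rfl⟩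
    have hmem2 := List.min?_mem hm2
    have h2 : ((heap.erase m).erase m2).length = (heap.erase m).length - 1 :=
      List.length_erase_of_mem hmem2
    have hs2 : m2 + ((heap.erase m).erase m2).sum = (heap.erase m).sum := List.sum_erase hmem2
    rw [findLoop]
    simp only [h, dif_pos, pvHeappop, hm, hm2]
    have hne' : (m + m2 - 1) :: (heap.erase m).erase m2 ≠ [] := by simp
    rw [findLoop_closed _ hne']
    simp only [List.sum_cons, List.length_cons, h2, h1]
    have hl : 1 < heap.length := h
    push_cast [Nat.sub_sub, Nat.cast_sub (by omega : 2 ≤ heap.length)]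
    omega
  · rw [findLoop]
    simp only [h, dif_neg, not_false_iff]
    cases heap with
    | nil => simp at hne
    | cons a t =>
      have : t = [] := by
        cases t with
        | nil => rfl
        | cons b s => simp at h
      subst this; simp
termination_by heap.length
decreasing_by
  simp only [List.length_cons, h2, h1]
  omega

-- ===== VERDICT (by name: the statement is the Claim_ definition above) =====
theorem find_spec : Claim_equal_find := by
  intro nums _ hpre
  unfold Spec_find find find_alt
  exact findLoop_closed nums hpre
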